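-- pv_equiv track=rewrite | github.com/Yaswanthh13426789155/SAP-AI | sap_agent.py | _build_open_questions
-- ===== SOURCE A (Python) =====
-- def _append_unique(items, value, limit=None):
--     value = str(value or "").strip()
--     if not value:
--         return items
--     normalized_existing = {item.lower() for item in items}
--     if value.lower() in normalized_existing:
--         return items
--     items.append(value)
--     if limit:
--         return items[:limit]
--     return items
--
-- def _build_open_questions(workspace, analysis_context, query, mixed_workstreams=None):
--     sections = workspace.get("sections", {})
--     required_inputs = sections.get("Required Inputs") or []
--     lower_query = query.lower()
--     questions = []
--
--     for required_input in required_inputs[:5]: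
--         normalized = required_input.lower()
--         if normalized in lower_query:
--             continue
--         if any(token in lower_query for token in normalized.replace(",", " ").split()[:2]):
--             continue
--         questions = _append_unique(questions, f"Confirm: {required_input}", limit=4)
--
--     if not questions and (analysis_context or {}).get("image_findings"):
--         questions.append("Confirm whether the screenshot evidence matches the exact user action that failed.")
--
--     if mixed_workstreams:
--         questions = _append_unique(
--             questions,
--             "Confirm whether one issue started earlier and caused the later SAP symptoms.",
--             limit=4,
--         )
--         questions = _append_unique(
--             questions,
--             "Confirm which team owns each workstream before applying parallel changes.",
--             limit=4,
--         )
--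
--     return questions[:4]
-- ===== SOURCE B (Python) =====
-- def _build_open_questions(workspace, analysis_context, query, mixed_workstreams=None):
--     required_inputs = (workspace.get("sections", {}).get("Required Inputs") or [])[:5]
--     lower_query = query.lower()
--
--     def relevant(item):
--         norm = item.lower()
--         if norm in lower_query:
--             return False
--         return not any(tok in lower_query for tok in norm.replace(",", " ").split()[:2])
--
--     candidates = [("Confirm: " + item).strip() for item in required_inputs if relevant(item)]
--     if not candidates and (analysis_context or {}).get("image_findings"):
--         candidates = ["Confirm whether the screenshot evidence matches the exact user action that failed."]
--     if mixed_workstreams: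
--         candidates.append("Confirm whether one issue started earlier and caused the later SAP symptoms.")
--         candidates.append("Confirm which team owns each workstream before applying parallel changes.")
--
--     result, seen = [], set()
--     for q in candidates:
--         key = q.lower()
--         if key not in seen:
--             seen.add(key)
--             result.append(q)
--             if len(result) == 4:
--                 break
--     return result
-- ===== Notes on version B (the rewrite author's own statement) =====
-- stated objective: simpler
-- what changed: A appends each question through a helper that rebuilds a lowercase set of all collected questions and re-slices to 4 at every step, with dedup logic interleaved into three separate call sites; B first builds the full ordered candidate list (filter/map over required_inputs[:5], then the image and mixed-workstream strings) and runs one order-preserving case-insensitive dedup pass with a persistent seen set, stopping at 4.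
import Mathlib
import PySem

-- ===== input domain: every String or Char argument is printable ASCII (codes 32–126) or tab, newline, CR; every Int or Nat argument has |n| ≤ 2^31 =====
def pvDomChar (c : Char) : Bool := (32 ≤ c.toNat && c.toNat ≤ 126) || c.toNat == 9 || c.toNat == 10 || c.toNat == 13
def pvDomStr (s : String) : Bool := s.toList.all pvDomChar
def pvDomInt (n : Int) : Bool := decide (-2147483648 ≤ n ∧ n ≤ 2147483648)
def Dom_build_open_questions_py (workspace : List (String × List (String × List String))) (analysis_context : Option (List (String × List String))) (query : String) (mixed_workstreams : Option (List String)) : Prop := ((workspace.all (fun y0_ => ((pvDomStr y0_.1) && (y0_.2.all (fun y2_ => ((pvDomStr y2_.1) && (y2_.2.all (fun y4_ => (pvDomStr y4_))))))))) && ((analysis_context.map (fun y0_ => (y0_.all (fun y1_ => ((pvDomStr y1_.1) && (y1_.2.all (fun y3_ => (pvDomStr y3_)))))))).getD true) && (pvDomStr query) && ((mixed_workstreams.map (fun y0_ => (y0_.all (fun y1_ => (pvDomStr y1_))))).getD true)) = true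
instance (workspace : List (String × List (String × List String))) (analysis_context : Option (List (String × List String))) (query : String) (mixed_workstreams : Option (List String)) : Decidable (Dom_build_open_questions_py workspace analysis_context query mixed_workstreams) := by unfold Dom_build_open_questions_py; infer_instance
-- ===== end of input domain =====

-- B rebuilds the same questions by one filter/map comprehension plus a single dedup-and-cap pass (simpler decomposition); A = B proved on the whole domain.


-- ===== PORT A =====
-- _append_unique; `str(value or "")` is the identity on a string argument ("" or "" == "")
def pvAppendUnique (items : List String) (value : String) (limit : Option Int) : List String :=
  let value := PySem.Str.strip value
  if value = "" then items
  else
    let normalized_existing := PySem.Set.ofList (items.map PySem.Str.lower)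
    if normalized_existing.contains (PySem.Str.lower value) then items
    else
      let items := items ++ [value]
      match limit with
      | some l => if l ≠ 0 then PySem.List.slice items none (some l) else items
      | none => items

def build_open_questions_py (workspace : List (String × List (String × List String))) (analysis_context : Option (List (String × List String))) (query : String) (mixed_workstreams : Option (List String)) : List String :=
  let sections := (PySem.Dict.mk workspace).getD "sections" []
  -- `sections.get("Required Inputs") or []`: None and the empty list both give []
  let required_inputs := ((PySem.Dict.mk sections).get? "Required Inputs").getD []
  let lower_query := PySem.Str.lower query
  let questions := (PySem.List.slice required_inputs none (some 5)).foldl (fun questions required_input =>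
      let normalized := PySem.Str.lower required_input
      if PySem.Str.isIn normalized lower_query then questions
      else if (PySem.List.slice (PySem.Str.split₀ (PySem.Str.replace normalized "," " ")) none (some 2)).any
                (fun token => PySem.Str.isIn token lower_query) then questions
      else pvAppendUnique questions ("Confirm: " ++ required_input) (some 4)) []
  -- `(analysis_context or {}).get("image_findings")` is truthy iff the looked-up list exists and is nonempty
  let questions := if questions = [] ∧ ((PySem.Dict.mk (analysis_context.getD [])).get? "image_findings").getD [] ≠ []
    then questions ++ ["Confirm whether the screenshot evidence matches the exact user action that failed."]
    else questions
  let questions := if mixed_workstreams.getD [] ≠ [] then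
      pvAppendUnique (pvAppendUnique questions "Confirm whether one issue started earlier and caused the later SAP symptoms." (some 4))
        "Confirm which team owns each workstream before applying parallel changes." (some 4)
    else questions
  PySem.List.slice questions none (some 4)

-- ===== PORT B =====
-- one order-preserving case-insensitive dedup pass with a persistent `seen` set, breaking at 4 kept items
def pvDedupTake4 (cands : List String) (seen : PySem.Set String) (acc : List String) : List String :=
  match cands with
  | [] => acc
  | q :: rest =>
    let key := PySem.Str.lower q
    if seen.contains key then pvDedupTake4 rest seen acc
    else
      let acc' := acc ++ [q]
      if acc'.length = 4 then acc' else pvDedupTake4 rest (seen.add key) acc'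

def build_open_questions_py_alt (workspace : List (String × List (String × List String))) (analysis_context : Option (List (String × List String))) (query : String) (mixed_workstreams : Option (List String)) : List String :=
  let required_inputs := PySem.List.slice (((PySem.Dict.mk ((PySem.Dict.mk workspace).getD "sections" [])).get? "Required Inputs").getD []) none (some 5)
  let lower_query := PySem.Str.lower query
  let relevant := fun (item : String) =>
    let norm := PySem.Str.lower item
    if PySem.Str.isIn norm lower_query then false
    else !((PySem.List.slice (PySem.Str.split₀ (PySem.Str.replace norm "," " ")) none (some 2)).any
            (fun tok => PySem.Str.isIn tok lower_query))
  let candidates := (required_inputs.filter relevant).map (fun item => PySem.Str.strip ("Confirm: " ++ item))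
  let candidates := if candidates = [] ∧ ((PySem.Dict.mk (analysis_context.getD [])).get? "image_findings").getD [] ≠ []
    then ["Confirm whether the screenshot evidence matches the exact user action that failed."]
    else candidates
  let candidates := if mixed_workstreams.getD [] ≠ [] then
      candidates ++ ["Confirm whether one issue started earlier and caused the later SAP symptoms.",
                     "Confirm which team owns each workstream before applying parallel changes."]
    else candidates
  pvDedupTake4 candidates PySem.Set.empty []

-- ===== PRECONDITION & SPEC =====
def Spec_build_open_questions_py (workspace : List (String × List (String × List String))) (analysis_context : Option (List (String × List String))) (query : String) (mixed_workstreams : Option (List String)) (out : List String) : Prop := out = build_open_questions_py_alt workspace analysis_context query mixed_workstreams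
instance (workspace : List (String × List (String × List String))) (analysis_context : Option (List (String × List String))) (query : String) (mixed_workstreams : Option (List String)) (out : List String) : Decidable (Spec_build_open_questions_py workspace analysis_context query mixed_workstreams out) := by unfold Spec_build_open_questions_py; infer_instance

-- ===== CLAIM (what is proved, stated in full; the proofs are below) =====
def Claim_equal_build_open_questions_py : Prop := ∀ (workspace : List (String × List (String × List String))) (analysis_context : Option (List (String × List String))) (query : String) (mixed_workstreams : Option (List String)), Dom_build_open_questions_py workspace analysis_context query mixed_workstreams → Spec_build_open_questions_py workspace analysis_context query mixed_workstreams (build_open_questions_py workspace analysis_context query mixed_workstreams)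

-- ===== LEMMAS AND PROOFS =====

theorem strip_confirm_ne (x : String) : PySem.Str.strip ("Confirm: " ++ x) ≠ "" := by
  intro h
  have h2 : PySem.Chars.strip ('C' :: ("onfirm: ".toList ++ x.toList)) = [] := by
    have h3 := congrArg String.toList h
    rw [PySem.Str.toList_strip, String.toList_append] at h3
    simpa using h3
  unfold PySem.Chars.strip PySem.Chars.rstrip PySem.Chars.lstrip at h2
  rw [List.dropWhile_cons_of_neg (by decide), List.reverse_eq_nil_iff,
    List.dropWhile_eq_nil_iff] at h2
  have := h2 'C' (by simp)
  exact absurd this (by decide)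

theorem take_four_append_one (acc : List String) (v : String) (h : acc.length = 4) :
    (acc ++ [v]).take 4 = acc := by
  rw [List.take_append]
  simp [h, List.take_of_length_le]

theorem append4_of_len4 (acc : List String) (v : String) (h : acc.length = 4) :
    pvAppendUnique acc v (some 4) = acc := by
  simp only [pvAppendUnique]
  split_ifs with h1 h2 h3
  · rfl
  · rfl
  · rw [PySem.List.slice_to (acc ++ [PySem.Str.strip v]) (by norm_num)]
    exact take_four_append_one acc _ h
  · exact absurd (show (4 : Int) ≠ 0 by norm_num) h3

theorem foldl_append4_of_len4 (vs : List String) (acc : List String) (h : acc.length = 4) :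
    vs.foldl (fun qs v => pvAppendUnique qs v (some 4)) acc = acc := by
  induction vs with
  | nil => rfl
  | cons v rest ih => rw [List.foldl_cons, append4_of_len4 acc v h]; exact ih

theorem contains_ofList_eq (acc : List String) (k : String) :
    ((PySem.Set.ofList (acc.map PySem.Str.lower)).contains k = true) ↔ k ∈ acc.map PySem.Str.lower := by
  rw [PySem.Set.contains_iff, PySem.Set.mem_ofList]

theorem append4_dup (acc : List String) (v : String) (hv : PySem.Str.strip v ≠ "")
    (hdup : PySem.Str.lower (PySem.Str.strip v) ∈ acc.map PySem.Str.lower) :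
    pvAppendUnique acc v (some 4) = acc := by
  simp only [pvAppendUnique]
  rw [if_neg hv, if_pos ((contains_ofList_eq acc _).mpr hdup)]

theorem append4_new (acc : List String) (v : String) (hv : PySem.Str.strip v ≠ "")
    (hdup : PySem.Str.lower (PySem.Str.strip v) ∉ acc.map PySem.Str.lower)
    (hlen : acc.length < 4) :
    pvAppendUnique acc v (some 4) = acc ++ [PySem.Str.strip v] := by
  simp only [pvAppendUnique]
  rw [if_neg hv, if_neg (fun hc => hdup ((contains_ofList_eq acc _).mp hc)),
    if_pos (show (4 : Int) ≠ 0 by norm_num), PySem.List.slice_to _ (by norm_num)]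
  exact List.take_of_length_le (by simp [List.length_append]; omega)

theorem foldl_append4_eq_dedup (vs : List String) (seen : PySem.Set String) (acc : List String)
    (hvs : ∀ v ∈ vs, PySem.Str.strip v ≠ "")
    (hseen : ∀ k, seen.contains k = true ↔ k ∈ acc.map PySem.Str.lower)
    (hlen : acc.length < 4) :
    vs.foldl (fun qs v => pvAppendUnique qs v (some 4)) acc
      = pvDedupTake4 (vs.map PySem.Str.strip) seen acc := by
  induction vs generalizing seen acc with
  | nil => rfl
  | cons v rest ih =>
    have hv : PySem.Str.strip v ≠ "" := hvs v (List.mem_cons_self ..)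
    simp only [List.map_cons, List.foldl_cons]
    rw [pvDedupTake4]
    simp only []
    by_cases hdup : PySem.Str.lower (PySem.Str.strip v) ∈ acc.map PySem.Str.lower
    · rw [if_pos ((hseen _).mpr hdup), append4_dup acc v hv hdup]
      exact ih seen acc (fun w hw => hvs w (List.mem_cons_of_mem v hw)) hseen hlen
    · rw [if_neg (fun hc => hdup ((hseen _).mp hc)), append4_new acc v hv hdup hlen]
      by_cases h4 : (acc ++ [PySem.Str.strip v]).length = 4
      · rw [if_pos h4]
        exact foldl_append4_of_len4 _ _ h4
      · rw [if_neg h4]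
        refine ih _ _ (fun w hw => hvs w (List.mem_cons_of_mem v hw)) ?_ ?_
        · intro k
          rw [PySem.Set.contains_iff, PySem.Set.mem_add, List.map_append, List.map_cons]
          simp only [List.map_nil, List.mem_append, List.mem_singleton]
          constructor
          · rintro (hk | rfl)
            · exact Or.inl ((hseen k).mp ((PySem.Set.contains_iff seen k).mpr hk))
            · exact Or.inr rfl
          · rintro (hk | rfl)
            · exact Or.inl ((PySem.Set.contains_iff seen k).mp ((hseen k).mpr hk))
            · exact Or.inr rfl
        · simp only [List.length_append, List.length_singleton] at h4 ⊢
          omega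

theorem dedup_len_le (cs : List String) (seen : PySem.Set String) (acc : List String)
    (h : acc.length < 4) : (pvDedupTake4 cs seen acc).length ≤ 4 := by
  induction cs generalizing seen acc with
  | nil => simpa [pvDedupTake4] using h.le
  | cons q rest ih =>
    rw [pvDedupTake4]
    simp only []
    split_ifs with h1 h2
    · exact ih seen acc h
    · exact h2.le
    · refine ih _ _ ?_
      simp only [List.length_append, List.length_singleton] at h2 ⊢
      omega

theorem append4_ne_nil (acc : List String) (v : String) (h : acc ≠ []) :
    pvAppendUnique acc v (some 4) ≠ [] := by
  simp only [pvAppendUnique]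
  split_ifs with h1 h2 h3
  · exact h
  · exact h
  · rw [PySem.List.slice_to _ (by norm_num)]
    intro hnil
    rcases List.exists_cons_of_ne_nil h with ⟨a, t, rfl⟩
    simp [List.take_succ_cons] at hnil
  · exact absurd (show (4 : Int) ≠ 0 by norm_num) h3

theorem foldl_append4_ne_nil (vs : List String) (acc : List String) (h : acc ≠ []) :
    vs.foldl (fun qs v => pvAppendUnique qs v (some 4)) acc ≠ [] := by
  induction vs generalizing acc with
  | nil => exact h
  | cons v rest ih =>
    rw [List.foldl_cons]
    exact ih _ (append4_ne_nil acc v h)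

theorem append4_nil (v : String) (hv : PySem.Str.strip v ≠ "") :
    pvAppendUnique [] v (some 4) = [PySem.Str.strip v] := by
  simpa using append4_new [] v hv (by simp) (by simp)

theorem foldl_branch (lq : String) (xs : List String) (acc : List String) :
    xs.foldl (fun questions required_input =>
        let normalized := PySem.Str.lower required_input
        if PySem.Str.isIn normalized lq then questions
        else if (PySem.List.slice (PySem.Str.split₀ (PySem.Str.replace normalized "," " ")) none (some 2)).any
                  (fun token => PySem.Str.isIn token lq) then questions
        else pvAppendUnique questions ("Confirm: " ++ required_input) (some 4)) acc
      = ((xs.filter (fun item =>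
          if PySem.Str.isIn (PySem.Str.lower item) lq = true then false
          else !((PySem.List.slice (PySem.Str.split₀ (PySem.Str.replace (PySem.Str.lower item) "," " ")) none (some 2)).any
                  (fun tok => PySem.Str.isIn tok lq)))).map
            (fun item => "Confirm: " ++ item)).foldl (fun qs v => pvAppendUnique qs v (some 4)) acc := by
  induction xs generalizing acc with
  | nil => rfl
  | cons x rest ih =>
    simp only [List.foldl_cons, List.filter_cons]
    by_cases h1 : PySem.Str.isIn (PySem.Str.lower x) lq = true
    · simp only [h1, if_true, Bool.false_eq_true, if_false]
      exact ih acc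
    · by_cases h2 : ((PySem.List.slice (PySem.Str.split₀ (PySem.Str.replace (PySem.Str.lower x) "," " ")) none (some 2)).any
          (fun token => PySem.Str.isIn token lq)) = true
      · simp only [h1, h2, if_true, if_false, Bool.not_true, Bool.false_eq_true]
        exact ih acc
      · simp only [h1, Bool.not_eq_true] at h2 ⊢
        simp only [h2, Bool.not_false, if_true, Bool.false_eq_true, if_false, List.map_cons,
          List.foldl_cons]
        exact ih _

-- ===== VERDICT (by name: the statement is the Claim_ definition above) =====
theorem empty_seen_iff : ∀ k : String, (PySem.Set.empty : PySem.Set String).contains k = true ↔ k ∈ ([] : List String).map PySem.Str.lower := by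
  intro k
  simp [PySem.Set.empty, PySem.Set.contains]

theorem build_open_questions_py_spec : Claim_equal_build_open_questions_py := by
  intro workspace analysis_context query mixed_workstreams _
  unfold Spec_build_open_questions_py
  simp only [build_open_questions_py, build_open_questions_py_alt]
  rw [foldl_branch]
  have hmapmap : ∀ F : List String,
      F.map (fun item => PySem.Str.strip ("Confirm: " ++ item))
        = (F.map (fun item => "Confirm: " ++ item)).map PySem.Str.strip := by
    intro F; rw [List.map_map]; rfl
  rw [hmapmap]
  have hraw : ∀ w ∈ ((PySem.List.slice (((PySem.Dict.mk ((PySem.Dict.mk workspace).getD "sections" [])).get? "Required Inputs").getD []) none (some 5)).filter (fun item =>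
          if PySem.Str.isIn (PySem.Str.lower item) (PySem.Str.lower query) = true then false
          else !((PySem.List.slice (PySem.Str.split₀ (PySem.Str.replace (PySem.Str.lower item) "," " ")) none (some 2)).any
                  (fun tok => PySem.Str.isIn tok (PySem.Str.lower query))))).map (fun item => "Confirm: " ++ item),
      PySem.Str.strip w ≠ "" := by
    intro w hw
    obtain ⟨i, _, rfl⟩ := List.mem_map.mp hw
    exact strip_confirm_ne i
  generalize hG : ((PySem.List.slice (((PySem.Dict.mk ((PySem.Dict.mk workspace).getD "sections" [])).get? "Required Inputs").getD []) none (some 5)).filter (fun item =>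
          if PySem.Str.isIn (PySem.Str.lower item) (PySem.Str.lower query) = true then false
          else !((PySem.List.slice (PySem.Str.split₀ (PySem.Str.replace (PySem.Str.lower item) "," " ")) none (some 2)).any
                  (fun tok => PySem.Str.isIn tok (PySem.Str.lower query))))).map (fun item => "Confirm: " ++ item) = raw at hraw ⊢
  clear hG
  cases raw with
  | nil =>
    simp only [List.map_nil, List.foldl_nil, true_and]
    by_cases hI : ((PySem.Dict.mk (analysis_context.getD [])).get? "image_findings").getD [] ≠ []
    · simp only [if_pos hI]
      by_cases hM : mixed_workstreams.getD [] ≠ []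
      · simp only [if_pos hM]; decide
      · simp only [if_neg hM]; decide
    · simp only [if_neg hI]
      by_cases hM : mixed_workstreams.getD [] ≠ []
      · simp only [if_pos hM]; decide
      · simp only [if_neg hM]; rfl
  | cons v rest =>
    have hv : PySem.Str.strip v ≠ "" := hraw v (List.mem_cons_self ..)
    have hconds : ∀ w ∈ (v :: rest) ++ ["Confirm whether one issue started earlier and caused the later SAP symptoms.",
        "Confirm which team owns each workstream before applying parallel changes."], PySem.Str.strip w ≠ "" := by
      intro w hw
      rcases List.mem_append.mp hw with h | h
      · exact hraw w h
      · simp only [List.mem_cons, List.not_mem_nil, or_false] at h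
        rcases h with rfl | rfl
        · decide
        · decide
    have key := foldl_append4_eq_dedup ((v :: rest) ++ ["Confirm whether one issue started earlier and caused the later SAP symptoms.",
        "Confirm which team owns each workstream before applying parallel changes."]) PySem.Set.empty [] hconds empty_seen_iff (by simp)
    rw [List.foldl_append, List.map_append] at key
    rw [show (["Confirm whether one issue started earlier and caused the later SAP symptoms.",
        "Confirm which team owns each workstream before applying parallel changes."].map PySem.Str.strip)
        = ["Confirm whether one issue started earlier and caused the later SAP symptoms.",
        "Confirm which team owns each workstream before applying parallel changes."] from by decide] at key
    have key2 := foldl_append4_eq_dedup (v :: rest) PySem.Set.empty [] (fun w hw => hraw w hw) empty_seen_iff (by simp)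
    generalize hQ : List.foldl (fun qs v => pvAppendUnique qs v (some 4)) [] (v :: rest) = Q at key key2 ⊢
    have hQne : Q ≠ [] := by
      rw [← hQ, List.foldl_cons, append4_nil v hv]
      exact foldl_append4_ne_nil _ _ (by simp)
    have hBne : (v :: rest).map PySem.Str.strip ≠ [] := by simp
    rw [if_neg (show ¬(Q = [] ∧ ((PySem.Dict.mk (analysis_context.getD [])).get? "image_findings").getD [] ≠ []) from fun h => hQne h.1),
      if_neg (show ¬((v :: rest).map PySem.Str.strip = [] ∧ ((PySem.Dict.mk (analysis_context.getD [])).get? "image_findings").getD [] ≠ []) from fun h => hBne h.1)]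
    by_cases hM : mixed_workstreams.getD [] ≠ []
    · simp only [if_pos hM]
      rw [show pvAppendUnique (pvAppendUnique Q "Confirm whether one issue started earlier and caused the later SAP symptoms." (some 4))
            "Confirm which team owns each workstream before applying parallel changes." (some 4)
          = List.foldl (fun qs v => pvAppendUnique qs v (some 4)) Q
            ["Confirm whether one issue started earlier and caused the later SAP symptoms.",
             "Confirm which team owns each workstream before applying parallel changes."] from rfl, key]
      rw [PySem.List.slice_to _ (by norm_num)]
      exact List.take_of_length_le (le_trans (dedup_len_le _ _ _ (by simp)) (by norm_num))
    · simp only [if_neg hM]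
      rw [key2]
      rw [PySem.List.slice_to _ (by norm_num)]
      exact List.take_of_length_le (le_trans (dedup_len_le _ _ _ (by simp)) (by norm_num))
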